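-- pv_equiv track=rewrite | github.com/zhukovanadezhda/dinucleo-freq | dinucleo_freq.py | count_dinucleotides
-- ===== SOURCE A (Python) =====
-- def count_dinucleotides(seq):
--     """Calculating the number dinucleotides of each type in the sequence.
--
--     Parameters
--     ----------
--     seq : str
--         Nucleotide sequence.
--
--     Returns
--     -------
--     di_counts : dic
--         The number of dinucleotides in the sequence for each nucleotide.
--     """
--
--     di_counts = {"TT": 0, "GT": 0, "CT": 0, "AT": 0, "TG": 0, "GG": 0, "CG": 0, "AG": 0, "TC": 0, "GC": 0, "CC": 0, "AC": 0, "TA": 0, "GA": 0, "CA": 0, "AA": 0}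
--     compliments = {"A": "T", "T": "A", "C": "G", "G": "C"}
--
--     try:
--         dna_forward_seq = seq.seq
--     except:
--         dna_forward_seq = seq
--
--     for i in range(len(dna_forward_seq)-1):
--         di_forward = dna_forward_seq[i:i+2]
--         if di_forward[0] in compliments and di_forward[1] in compliments:
--             di_reversed = compliments[di_forward[1]]+compliments[di_forward[0]]
--             di_counts[di_forward] += 1
--             di_counts[di_reversed] += 1
--
--     return di_counts
-- ===== SOURCE B (Python) =====
-- def count_dinucleotides(seq):
--     """Count dinucleotides (pair + reverse-complement pair) for each of the 16 types."""
--     try: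
--         dna = seq.seq
--     except AttributeError:
--         dna = seq
--
--     comp = {"A": "T", "T": "A", "C": "G", "G": "C"}
--
--     def occurrences(pair):
--         # overlapping count of the 2-letter pattern in dna
--         n = 0
--         for i in range(len(dna) - 1):
--             if dna[i] == pair[0] and dna[i + 1] == pair[1]:
--                 n += 1
--         return n
--
--     return {k: occurrences(k) + occurrences(comp[k[1]] + comp[k[0]])
--             for k in ["TT", "GT", "CT", "AT", "TG", "GG", "CG", "AG",
--                       "TC", "GC", "CC", "AC", "TA", "GA", "CA", "AA"]}
-- ===== Notes on version B (the rewrite author's own statement) =====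
-- stated objective: alternative
-- what changed: A makes one pass over positions, double-incrementing a pre-initialised 16-key dict (pair and its reverse complement) at each valid position; B keeps no running dict at all and instead, for each of the 16 fixed keys, counts overlapping occurrences of that pattern and of its reverse complement directly in the string; it trades the single dict-updating pass for 32 pattern scans.
import Mathlib
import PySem

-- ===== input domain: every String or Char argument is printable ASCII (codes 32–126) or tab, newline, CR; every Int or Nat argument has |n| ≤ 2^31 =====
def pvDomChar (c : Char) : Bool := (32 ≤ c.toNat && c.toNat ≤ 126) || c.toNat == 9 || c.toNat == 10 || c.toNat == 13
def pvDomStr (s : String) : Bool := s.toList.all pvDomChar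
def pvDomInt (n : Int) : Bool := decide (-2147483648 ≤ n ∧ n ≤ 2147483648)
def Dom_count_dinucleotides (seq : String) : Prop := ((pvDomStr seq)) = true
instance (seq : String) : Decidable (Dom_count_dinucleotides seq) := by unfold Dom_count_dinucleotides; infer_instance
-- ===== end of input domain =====

-- B replaces A's single dict-updating pass (double-increment per valid position) by
-- per-pattern counting: for each of the 16 fixed keys it counts overlapping occurrences
-- of that pattern and of its reverse complement directly in the string (no running dict);
-- a genuinely different decomposition of the same O(n) task, not claimed faster.


-- ===== PORT A =====
-- compliments = {"A": "T", "T": "A", "C": "G", "G": "C"}   (the same literal dict in both Pythons)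
def pvComp : PySem.Dict Char Char :=
  PySem.Dict.ofList [('A', 'T'), ('T', 'A'), ('C', 'G'), ('G', 'C')]

-- di_counts = {"TT": 0, ..., "AA": 0}
def aInit : PySem.Dict String Int :=
  PySem.Dict.ofList [("TT", 0), ("GT", 0), ("CT", 0), ("AT", 0), ("TG", 0), ("GG", 0),
    ("CG", 0), ("AG", 0), ("TC", 0), ("GC", 0), ("CC", 0), ("AC", 0), ("TA", 0),
    ("GA", 0), ("CA", 0), ("AA", 0)]

-- the body of A's for-loop over i (matches on pyGet?/get? totalize accesses that cannot fail there)
def aBody (dna : String) (d : PySem.Dict String Int) (i : Int) : PySem.Dict String Int :=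
  let di := PySem.Str.slice dna (some i) (some (i + 2))
  match PySem.Str.pyGet? di 0, PySem.Str.pyGet? di 1 with
  | some c0, some c1 =>
    if pvComp.contains c0 && pvComp.contains c1 then
      match pvComp.get? c1, pvComp.get? c0 with
      | some a, some b =>
        let rev := String.ofList [a, b]
        let d1 := match d.get? di with
                  | some v => d.insert di (v + 1)
                  | none => d
        match d1.get? rev with
        | some v => d1.insert rev (v + 1)
        | none => d1
      | _, _ => d
    else d
  | _, _ => d

def count_dinucleotides (seq : String) : List (String × Int) :=
  -- try: seq.seq / except: a str has no attribute 'seq', so dna_forward_seq = seq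
  let dna := seq
  ((PySem.List.pyRange 0 (PySem.Str.len dna - 1) 1).foldl (aBody dna) aInit).items

-- ===== PORT B =====
-- occurrences(pair): overlapping count of the 2-letter pattern in dna
-- (the pyGet?s totalize indexings that cannot fail: i is in range and pair has length 2)
def bOcc (dna : String) (pair : String) : Int :=
  (PySem.List.pyRange 0 (PySem.Str.len dna - 1) 1).foldl
    (fun n i =>
      if PySem.Str.pyGet? dna i == PySem.Str.pyGet? pair 0
         && PySem.Str.pyGet? dna (i + 1) == PySem.Str.pyGet? pair 1
      then n + 1 else n) 0

-- body of the dict comprehension: k ↦ occurrences(k) + occurrences(comp[k[1]] + comp[k[0]])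
def bEntry (dna : String) (d : PySem.Dict String Int) (k : String) : PySem.Dict String Int :=
  match PySem.Str.pyGet? k 1, PySem.Str.pyGet? k 0 with
  | some c1, some c0 =>
    match pvComp.get? c1, pvComp.get? c0 with
    | some a, some b => d.insert k (bOcc dna k + bOcc dna (String.ofList [a, b]))
    | _, _ => d
  | _, _ => d

def count_dinucleotides_alt (seq : String) : List (String × Int) :=
  -- try/except as in A: a str has no attribute 'seq'
  let dna := seq
  ((["TT", "GT", "CT", "AT", "TG", "GG", "CG", "AG", "TC", "GC", "CC", "AC", "TA", "GA",
      "CA", "AA"] : List String).foldl (bEntry dna) PySem.Dict.empty).items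

-- ===== PRECONDITION & SPEC =====
def Spec_count_dinucleotides (seq : String) (out : List (String × Int)) : Prop := out = count_dinucleotides_alt seq
instance (seq : String) (out : List (String × Int)) : Decidable (Spec_count_dinucleotides seq out) := by unfold Spec_count_dinucleotides; infer_instance

-- ===== CLAIM (what is proved, stated in full; the proofs are below) =====
def Claim_equal_count_dinucleotides : Prop := ∀ (seq : String), Dom_count_dinucleotides seq → Spec_count_dinucleotides seq (count_dinucleotides seq)

-- ===== LEMMAS AND PROOFS =====

def pvKeys : List String :=
  ["TT", "GT", "CT", "AT", "TG", "GG", "CG", "AG", "TC", "GC", "CC", "AC", "TA", "GA",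
    "CA", "AA"]

def pvValid (p : Char × Char) : Bool := pvComp.contains p.1 && pvComp.contains p.2

def pvPair (p : Char × Char) : String := String.ofList [p.1, p.2]

def pvRC (p : Char × Char) : String :=
  match pvComp.get? p.2, pvComp.get? p.1 with
  | some a, some b => String.ofList [a, b]
  | _, _ => ""

def pvRCK (k : String) : String :=
  match PySem.Str.pyGet? k 1, PySem.Str.pyGet? k 0 with
  | some c1, some c0 =>
    match pvComp.get? c1, pvComp.get? c0 with
    | some a, some b => String.ofList [a, b]
    | _, _ => k
  | _, _ => k

def pvCompF (c : Char) : Char :=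
  if c = 'A' then 'T' else if c = 'T' then 'A' else if c = 'C' then 'G' else 'C'

-- the pair step A's loop performs, expressed on the pair of characters
def stepA (d : PySem.Dict String Int) (p : Char × Char) : PySem.Dict String Int :=
  if pvValid p then
    match pvComp.get? p.2, pvComp.get? p.1 with
    | some a, some b =>
      let rev := String.ofList [a, b]
      let d1 := match d.get? (pvPair p) with
                | some v => d.insert (pvPair p) (v + 1)
                | none => d
      match d1.get? rev with
      | some v => d1.insert rev (v + 1)
      | none => d1
    | _, _ => d
  else d

lemma contains_cases (c : Char) (h : pvComp.contains c = true) :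
    c = 'A' ∨ c = 'T' ∨ c = 'C' ∨ c = 'G' := by
  have hmk : pvComp = ⟨[('A', 'T'), ('T', 'A'), ('C', 'G'), ('G', 'C')]⟩ := by decide
  rw [hmk] at h
  simp [PySem.Dict.contains_mk] at h
  tauto

lemma get?_pvComp (c : Char) (h : pvComp.contains c = true) :
    pvComp.get? c = some (pvCompF c) := by
  rcases contains_cases c h with rfl | rfl | rfl | rfl <;> decide

lemma pair_mem (a b : Char) (ha : pvComp.contains a = true) (hb : pvComp.contains b = true) :
    String.ofList [a, b] ∈ pvKeys := by
  rcases contains_cases a ha with rfl | rfl | rfl | rfl <;>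
    rcases contains_cases b hb with rfl | rfl | rfl | rfl <;> decide

lemma rc_mem (a b : Char) (ha : pvComp.contains a = true) (hb : pvComp.contains b = true) :
    String.ofList [pvCompF b, pvCompF a] ∈ pvKeys := by
  rcases contains_cases a ha with rfl | rfl | rfl | rfl <;>
    rcases contains_cases b hb with rfl | rfl | rfl | rfl <;> decide

lemma rc_vs_rck (p : Char × Char) (hp : pvValid p = true) (k : String) (hk : k ∈ pvKeys) :
    (pvRC p == k) = (pvPair p == pvRCK k) := by
  obtain ⟨a, b⟩ := p
  rw [pvValid, Bool.and_eq_true] at hp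
  rcases contains_cases a hp.1 with rfl | rfl | rfl | rfl <;>
    rcases contains_cases b hp.2 with rfl | rfl | rfl | rfl <;>
      fin_cases hk <;> decide

lemma pvKeys_nodup : pvKeys.Nodup := by decide

lemma keys_of_items (d : PySem.Dict String Int) (g : String → Int)
    (hd : d.items = pvKeys.map (fun k => (k, g k))) : d.keys = pvKeys := by
  simp [PySem.Dict.keys, hd, List.map_map, Function.comp_def]

lemma inc_eq (d : PySem.Dict String Int) (g : String → Int) (key : String)
    (hd : d.items = pvKeys.map (fun k => (k, g k))) (hk : key ∈ pvKeys) :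
    (match d.get? key with
     | some v => d.insert key (v + 1)
     | none => d) = d.insert key (g key + 1) := by
  have hkeys := keys_of_items d g hd
  have hnd : d.keys.Nodup := by rw [hkeys]; exact pvKeys_nodup
  have hget : d.get? key = some (g key) :=
    PySem.Dict.get?_of_mem_items d (by rw [hd]; exact List.mem_map_of_mem hk) hnd
  rw [hget]

lemma insert_items (d : PySem.Dict String Int) (g : String → Int) (key : String)
    (hd : d.items = pvKeys.map (fun k => (k, g k))) (hk : key ∈ pvKeys) :
    (d.insert key (g key + 1)).items =
      pvKeys.map (fun k => (k, if k = key then g k + 1 else g k)) := by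
  have hkeys := keys_of_items d g hd
  have hcont : d.contains key = true := by
    rw [PySem.Dict.contains_iff_mem_keys, hkeys]; exact hk
  rw [PySem.Dict.items_insert_of_contains _ _ hcont, hd, List.map_map]
  apply List.map_congr_left
  intro k hkmem
  by_cases h : k = key
  · subst h; simp
  · simp [Function.comp, h]

lemma stepA_items (d : PySem.Dict String Int) (g : String → Int) (p : Char × Char)
    (hd : d.items = pvKeys.map (fun k => (k, g k))) :
    (stepA d p).items =
      pvKeys.map (fun k => (k, g k + (if pvValid p && (pvPair p == k) then 1 else 0)
        + (if pvValid p && (pvRC p == k) then 1 else 0))) := by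
  by_cases hv : pvValid p = true
  · have hab := hv
    rw [pvValid, Bool.and_eq_true] at hab
    have ha := hab.1
    have hb := hab.2
    have hrc : pvRC p = String.ofList [pvCompF p.2, pvCompF p.1] := by
      rw [pvRC, get?_pvComp _ hb, get?_pvComp _ ha]
    have m1 : pvPair p ∈ pvKeys := pair_mem p.1 p.2 ha hb
    have m2 : String.ofList [pvCompF p.2, pvCompF p.1] ∈ pvKeys := rc_mem p.1 p.2 ha hb
    rw [stepA, if_pos hv, get?_pvComp _ hb, get?_pvComp _ ha]
    show (match (match d.get? (pvPair p) with
                 | some v => d.insert (pvPair p) (v + 1)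
                 | none => d).get? (String.ofList [pvCompF p.2, pvCompF p.1]) with
          | some v => (match d.get? (pvPair p) with
                       | some v => d.insert (pvPair p) (v + 1)
                       | none => d).insert (String.ofList [pvCompF p.2, pvCompF p.1]) (v + 1)
          | none => (match d.get? (pvPair p) with
                     | some v => d.insert (pvPair p) (v + 1)
                     | none => d)).items = _
    rw [inc_eq d g (pvPair p) hd m1]
    rw [inc_eq (d.insert (pvPair p) (g (pvPair p) + 1))
          (fun k => if k = pvPair p then g k + 1 else g k)
          (String.ofList [pvCompF p.2, pvCompF p.1])
          (insert_items d g (pvPair p) hd m1) m2]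
    rw [insert_items (d.insert (pvPair p) (g (pvPair p) + 1))
          (fun k => if k = pvPair p then g k + 1 else g k)
          (String.ofList [pvCompF p.2, pvCompF p.1])
          (insert_items d g (pvPair p) hd m1) m2]
    apply List.map_congr_left
    intro k hkmem
    simp only [hv, Bool.true_and, hrc, beq_iff_eq, Prod.mk.injEq, true_and]
    rcases eq_or_ne k (pvPair p) with rfl | h1
    · rcases eq_or_ne (pvPair p) (String.ofList [pvCompF p.2, pvCompF p.1]) with heq | hne
      · simp [heq]
        try omega
      · simp [hne, Ne.symm hne]
        try omega
    · rcases eq_or_ne k (String.ofList [pvCompF p.2, pvCompF p.1]) with rfl | h2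
      · simp [h1, Ne.symm h1]
        try omega
      · simp [h1, h2, Ne.symm h1, Ne.symm h2]
        try omega
  · have hv' : pvValid p = false := by simpa using hv
    rw [stepA, if_neg (by simp [hv'])]
    rw [hd]
    apply List.map_congr_left
    intro k hkmem
    simp [hv']

lemma aInit_items : aInit.items = pvKeys.map (fun k => (k, (0 : Int))) := by decide

lemma A_inv (L : List (Char × Char)) :
    (L.foldl stepA aInit).items =
      pvKeys.map (fun k => (k, (((L.filter pvValid).map pvPair).count k : Int)
        + (((L.filter pvValid).map pvRC).count k : Int))) := by
  induction L using List.reverseRecOn with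
  | nil => simpa using aInit_items
  | append_singleton t p ih =>
    rw [List.foldl_append, List.foldl_cons, List.foldl_nil]
    rw [stepA_items _ _ p ih]
    apply List.map_congr_left
    intro k hkmem
    simp only [List.filter_append, List.map_append, List.count_append, List.filter_cons,
      List.filter_nil]
    cases hv : pvValid p with
    | false =>
      simp
    | true =>
      by_cases h1 : (pvPair p == k) = true <;> by_cases h2 : (pvRC p == k) = true <;>
        simp [h1, h2, List.count_cons] <;> omega

lemma count_map_eq_countP (f : Char × Char → String) (F : List (Char × Char)) (k : String) :
    (F.map f).count k = F.countP (fun p => f p == k) := by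
  induction F with
  | nil => rfl
  | cons p t ih => simp [List.count_cons, List.countP_cons, ih]

lemma rc_count (F : List (Char × Char)) (hF : ∀ p ∈ F, pvValid p = true) (k : String)
    (hk : k ∈ pvKeys) : (F.map pvRC).count k = (F.map pvPair).count (pvRCK k) := by
  rw [count_map_eq_countP, count_map_eq_countP]
  apply List.countP_congr
  intro q hq
  rw [rc_vs_rck q (hF q hq) k hk]

lemma take_two_drop (l : List Char) (k : Nat) (h : k + 1 < l.length) :
    (l.drop k).take 2 = [l[k], l[k + 1]] := by
  apply List.ext_getElem
  · simp; omega
  · intro i h1 h2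
    have h3 : i < 2 := by simpa using h2
    simp only [List.getElem_take, List.getElem_drop]
    interval_cases i <;> simp

lemma pyget_pair_zero (x y : Char) : PySem.Str.pyGet? (String.ofList [x, y]) 0 = some x := by
  simp [PySem.Str.pyGet?, PySem.Chars.pyGet?]

lemma pyget_pair_one (x y : Char) : PySem.Str.pyGet? (String.ofList [x, y]) 1 = some y := by
  simp [PySem.Str.pyGet?, PySem.Chars.pyGet?]

lemma A_char (l : List Char) :
    count_dinucleotides (String.ofList l) =
      pvKeys.map (fun k => (k, ((((l.zip l.tail).filter pvValid).map pvPair).count k : Int)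
        + ((((l.zip l.tail).filter pvValid).map pvRC).count k : Int))) := by
  simp only [count_dinucleotides]
  have hlen : PySem.Str.len (String.ofList l) = (l.length : Int) := by
    rw [PySem.Str.len_eq, String.toList_ofList]
  rw [hlen]
  have hlz : (l.zip l.tail).length = l.length - 1 := by
    simp [List.length_zip, List.length_tail]
  have hlenz : PySem.List.len (l.zip l.tail) = (((l.zip l.tail).length : Nat) : Int) := by
    simp [PySem.List.len]
  have hrange : PySem.List.pyRange 0 ((l.length : Int) - 1) 1 =
      PySem.List.pyRange 0 (PySem.List.len (l.zip l.tail)) 1 := by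
    rw [hlenz, hlz]
    cases l with
    | nil => decide
    | cons c t =>
      congr 1
      push_cast [List.length_cons]
      omega
  rw [hrange]
  have hbody : ∀ (acc : PySem.Dict String Int),
      ∀ i ∈ PySem.List.pyRange 0 (PySem.List.len (l.zip l.tail)) 1,
      aBody (String.ofList l) acc i = stepA acc (PySem.List.pyGetD (l.zip l.tail) i (' ', ' ')) := by
    intro acc i hi
    rw [PySem.List.mem_pyRange_one] at hi
    obtain ⟨h0, hlt⟩ := hi
    obtain ⟨k, rfl⟩ : ∃ k : Nat, i = (k : Int) := ⟨i.toNat, (Int.toNat_of_nonneg h0).symm⟩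
    rw [hlenz] at hlt
    have hkz : k < (l.zip l.tail).length := by exact_mod_cast hlt
    have hk1 : k + 1 < l.length := by
      rw [hlz] at hkz; omega
    have hdi : PySem.Str.slice (String.ofList l) (some (k : Int)) (some ((k : Int) + 2)) =
        String.ofList [l[k], l[k + 1]] := by
      have h2 : ((k : Int) + 2) = (((k + 2 : Nat) : Int)) := by push_cast; ring
      rw [PySem.Str.slice, String.toList_ofList, h2]
      show String.ofList (PySem.List.slice l (some (k : Int)) (some ((k + 2 : Nat) : Int))) = _
      rw [PySem.List.slice_natCast]
      congr 1
      have h3 : k + 2 - k = 2 := by omega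
      rw [h3, take_two_drop l k hk1]
    have hZ : PySem.List.pyGetD (l.zip l.tail) (k : Int) (' ', ' ') = (l[k], l[k + 1]) := by
      rw [PySem.List.pyGetD_natCast, List.getD_eq_getElem _ _ hkz]
      have htl : k < l.tail.length := by simp [List.length_tail]; omega
      simp [List.getElem_zip, List.getElem_tail]
    rw [aBody, hdi, hZ, pyget_pair_zero, pyget_pair_one]
    rfl
  have hc := PySem.List.foldl_congr_mem
    (PySem.List.pyRange 0 (PySem.List.len (l.zip l.tail)) 1)
    (aBody (String.ofList l))
    (fun acc j => stepA acc (PySem.List.pyGetD (l.zip l.tail) j (' ', ' ')))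
    aInit hbody
  rw [hc]
  rw [PySem.List.foldl_pyRange_pyGetD (l.zip l.tail) (' ', ' ') stepA aInit (le_refl 0)]
  simpa using A_inv (l.zip l.tail)

-- ===== B-side lemmas =====

lemma ofList_pair_inj (a b x y : Char) :
    (String.ofList [a, b] = String.ofList [x, y]) ↔ (a = x ∧ b = y) := by
  constructor
  · intro h
    have h2 := congrArg String.toList h
    simpa using h2
  · rintro ⟨rfl, rfl⟩; rfl

lemma pyget_ofList_natCast (l : List Char) (k : Nat) (hk : k < l.length) :
    PySem.Str.pyGet? (String.ofList l) (k : Int) = some l[k] := by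
  simp [PySem.Str.pyGet?, String.toList_ofList, PySem.List.pyGet?_natCast,
    List.getElem?_eq_getElem hk]

-- bOcc on a two-valid-character pattern counts that pattern among the valid adjacent pairs
lemma bOcc_eq (l : List Char) (x y : Char) (hx : pvComp.contains x = true)
    (hy : pvComp.contains y = true) :
    bOcc (String.ofList l) (String.ofList [x, y]) =
      (((((l.zip l.tail).filter pvValid).map pvPair).count (String.ofList [x, y]) : Nat) : Int) := by
  simp only [bOcc]
  have hlen : PySem.Str.len (String.ofList l) = (l.length : Int) := by
    rw [PySem.Str.len_eq, String.toList_ofList]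
  rw [hlen, pyget_pair_zero, pyget_pair_one]
  have hlz : (l.zip l.tail).length = l.length - 1 := by
    simp [List.length_zip, List.length_tail]
  have hlenz : PySem.List.len (l.zip l.tail) = (((l.zip l.tail).length : Nat) : Int) := by
    simp [PySem.List.len]
  have hrange : PySem.List.pyRange 0 ((l.length : Int) - 1) 1 =
      PySem.List.pyRange 0 (PySem.List.len (l.zip l.tail)) 1 := by
    rw [hlenz, hlz]
    cases l with
    | nil => decide
    | cons c t =>
      congr 1
      push_cast [List.length_cons]
      omega
  rw [hrange]
  have hbody : ∀ (n : Int), ∀ i ∈ PySem.List.pyRange 0 (PySem.List.len (l.zip l.tail)) 1,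
      (if PySem.Str.pyGet? (String.ofList l) i == some x
          && PySem.Str.pyGet? (String.ofList l) (i + 1) == some y
       then n + 1 else n)
      = (fun (n : Int) (i : Int) =>
          if (fun q : Char × Char => q.1 == x && q.2 == y)
               (PySem.List.pyGetD (l.zip l.tail) i (' ', ' '))
          then n + 1 else n) n i := by
    intro n i hi
    rw [PySem.List.mem_pyRange_one] at hi
    obtain ⟨h0, hlt⟩ := hi
    obtain ⟨k, rfl⟩ : ∃ k : Nat, i = (k : Int) := ⟨i.toNat, (Int.toNat_of_nonneg h0).symm⟩
    rw [hlenz] at hlt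
    have hkz : k < (l.zip l.tail).length := by exact_mod_cast hlt
    have hk1 : k + 1 < l.length := by rw [hlz] at hkz; omega
    have hZ : PySem.List.pyGetD (l.zip l.tail) (k : Int) (' ', ' ') = (l[k], l[k + 1]) := by
      rw [PySem.List.pyGetD_natCast, List.getD_eq_getElem _ _ hkz]
      have htl : k < l.tail.length := by simp [List.length_tail]; omega
      simp [List.getElem_zip, List.getElem_tail]
    have hsucc : ((k : Int) + 1) = (((k + 1 : Nat) : Int)) := by push_cast; ring
    rw [pyget_ofList_natCast l k (by omega), hsucc, pyget_ofList_natCast l (k + 1) hk1]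
    simp [hZ]
  rw [PySem.List.foldl_congr_mem _ _ _ 0 hbody]
  rw [PySem.List.foldl_pyRange_pyGetD (l.zip l.tail) (' ', ' ')
    (fun (n : Int) (q : Char × Char) => if (q.1 == x && q.2 == y) then n + 1 else n) 0
    (le_refl 0)]
  rw [PySem.List.foldl_if_add_one]
  rw [count_map_eq_countP, List.countP_filter]
  norm_num
  apply List.countP_congr
  intro q hq
  constructor
  · intro h
    rw [Bool.and_eq_true, beq_iff_eq, beq_iff_eq] at h
    obtain ⟨h1, h2⟩ := h
    rw [Bool.and_eq_true, beq_iff_eq]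
    refine ⟨?_, ?_⟩
    · rw [pvPair, ofList_pair_inj]; exact ⟨h1, h2⟩
    · rw [pvValid, h1, h2, hx, hy]; rfl
  · intro h
    rw [Bool.and_eq_true, beq_iff_eq] at h
    obtain ⟨h1, _⟩ := h
    rw [pvPair, ofList_pair_inj] at h1
    rw [h1.1, h1.2]
    simp

-- every fixed key splits into two complement-table characters
lemma keys_split : ∀ k ∈ pvKeys, ∃ x y, pvComp.contains x = true ∧ pvComp.contains y = true ∧
    k = String.ofList [x, y] := by
  intro k hk
  fin_cases hk
  · exact ⟨'T', 'T', by decide, by decide, by decide⟩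
  · exact ⟨'G', 'T', by decide, by decide, by decide⟩
  · exact ⟨'C', 'T', by decide, by decide, by decide⟩
  · exact ⟨'A', 'T', by decide, by decide, by decide⟩
  · exact ⟨'T', 'G', by decide, by decide, by decide⟩
  · exact ⟨'G', 'G', by decide, by decide, by decide⟩
  · exact ⟨'C', 'G', by decide, by decide, by decide⟩
  · exact ⟨'A', 'G', by decide, by decide, by decide⟩
  · exact ⟨'T', 'C', by decide, by decide, by decide⟩
  · exact ⟨'G', 'C', by decide, by decide, by decide⟩
  · exact ⟨'C', 'C', by decide, by decide, by decide⟩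
  · exact ⟨'A', 'C', by decide, by decide, by decide⟩
  · exact ⟨'T', 'A', by decide, by decide, by decide⟩
  · exact ⟨'G', 'A', by decide, by decide, by decide⟩
  · exact ⟨'C', 'A', by decide, by decide, by decide⟩
  · exact ⟨'A', 'A', by decide, by decide, by decide⟩

lemma rck_mem : ∀ k ∈ pvKeys, pvRCK k ∈ pvKeys := by
  intro k hk; fin_cases hk <;> decide

lemma bOcc_key (l : List Char) (k : String) (hk : k ∈ pvKeys) :
    bOcc (String.ofList l) k =
      (((((l.zip l.tail).filter pvValid).map pvPair).count k : Nat) : Int) := by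
  obtain ⟨x, y, hx, hy, rfl⟩ := keys_split k hk
  exact bOcc_eq l x y hx hy

lemma bEntry_eq (dna : String) (d : PySem.Dict String Int) (k : String) (hk : k ∈ pvKeys) :
    bEntry dna d k = d.insert k (bOcc dna k + bOcc dna (pvRCK k)) := by
  fin_cases hk <;> rfl

lemma B_char (l : List Char) :
    count_dinucleotides_alt (String.ofList l) =
      pvKeys.map (fun k => (k, ((((l.zip l.tail).filter pvValid).map pvPair).count k : Int)
        + ((((l.zip l.tail).filter pvValid).map pvPair).count (pvRCK k) : Int))) := by
  simp only [count_dinucleotides_alt]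
  rw [show (["TT", "GT", "CT", "AT", "TG", "GG", "CG", "AG", "TC", "GC", "CC", "AC", "TA",
      "GA", "CA", "AA"] : List String) = pvKeys from rfl]
  have hc := PySem.List.foldl_congr_mem pvKeys
    (bEntry (String.ofList l))
    (fun d k => d.insert k (((((l.zip l.tail).filter pvValid).map pvPair).count k : Int)
      + ((((l.zip l.tail).filter pvValid).map pvPair).count (pvRCK k) : Int)))
    PySem.Dict.empty
    (by
      intro acc k hkk
      rw [bEntry_eq _ _ _ hkk, bOcc_key l k hkk, bOcc_key l (pvRCK k) (rck_mem k hkk)])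
  rw [hc]
  rw [PySem.Dict.items_foldl_insert_fresh pvKeys (fun k => k)
    (fun k => (((((l.zip l.tail).filter pvValid).map pvPair).count k : Int)
      + ((((l.zip l.tail).filter pvValid).map pvPair).count (pvRCK k) : Int)))
    PySem.Dict.empty
    (by intro a _; simp [PySem.Dict.contains_empty])
    (by simpa using pvKeys_nodup)]
  simp [show PySem.Dict.empty.items = ([] : List (String × Int)) from rfl]

-- ===== VERDICT (by name: the statement is the Claim_ definition above) =====
theorem count_dinucleotides_spec : Claim_equal_count_dinucleotides := by
  intro seq _
  unfold Spec_count_dinucleotides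
  obtain ⟨l, rfl⟩ : ∃ l, seq = String.ofList l := ⟨seq.toList, (String.ofList_toList).symm⟩
  rw [A_char l, B_char l]
  apply List.map_congr_left
  intro k hk
  have h2 := rc_count ((l.zip l.tail).filter pvValid)
    (fun p hp => (List.mem_filter.mp hp).2) k hk
  rw [h2]
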